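-- pv_equiv track=rewrite | github.com/GrinRus/ai_driven_dev_v2 | src/aidd/harness/conformance_matrix.py | _collect_markdown_tables
-- ===== SOURCE A (Python) =====
-- def _collect_markdown_tables(lines: list[str]) -> list[list[str]]:
--     tables: list[list[str]] = []
--     current: list[str] = []
--     for line in lines:
--         if line.strip().startswith("|"):
--             current.append(line)
--             continue
--         if current:
--             tables.append(current)
--             current = []
--     if current:
--         tables.append(current)
--     return tables
-- ===== SOURCE B (Python) =====
-- def _collect_markdown_tables(lines: list[str]) -> list[list[str]]:
--     tables: list[list[str]] = []
--     i, n = 0, len(lines)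
--     while i < n:
--         if lines[i].strip().startswith("|"):
--             j = i
--             while j < n and lines[j].strip().startswith("|"):
--                 j += 1
--             tables.append(lines[i:j])
--             i = j
--         else:
--             i += 1
--     return tables
-- ===== Notes on version B (the rewrite author's own statement) =====
-- stated objective: alternative
-- what changed: Replaced the accumulator-with-end-flush loop by a run scanner: on hitting a table line it takes the whole maximal run of table lines as a slice and skips past it, so no 'current' buffer or trailing flush exists.
import Mathlib
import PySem

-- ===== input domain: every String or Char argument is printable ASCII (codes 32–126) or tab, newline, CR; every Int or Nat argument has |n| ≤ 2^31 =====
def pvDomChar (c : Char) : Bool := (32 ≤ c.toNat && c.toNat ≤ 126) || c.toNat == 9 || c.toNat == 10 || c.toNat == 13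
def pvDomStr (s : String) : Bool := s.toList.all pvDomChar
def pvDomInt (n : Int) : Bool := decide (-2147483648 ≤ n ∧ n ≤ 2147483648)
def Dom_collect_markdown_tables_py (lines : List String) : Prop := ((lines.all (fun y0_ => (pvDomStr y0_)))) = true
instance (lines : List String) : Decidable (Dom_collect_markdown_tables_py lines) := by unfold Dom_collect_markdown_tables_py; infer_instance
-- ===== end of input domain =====

-- B replaces A's 'current' accumulator + end-of-loop flush by a maximal-run scanner (takeWhile/dropWhile); same result, no speed claim.


-- line.strip().startswith("|")
def pvIsTable (line : String) : Bool := PySem.Str.startswith (PySem.Str.strip line) "|"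

-- ===== PORT A =====
def collect_markdown_tables_py (lines : List String) : List (List String) :=
  let fin := lines.foldl
    (fun (st : List (List String) × List String) line =>
      if pvIsTable line then (st.1, st.2 ++ [line])
      else if st.2 ≠ [] then (st.1 ++ [st.2], []) else st)
    ([], [])
  if fin.2 ≠ [] then fin.1 ++ [fin.2] else fin.1

-- ===== PORT B =====
-- run scanner: take the maximal run of table lines, skip past it
def collect_markdown_tables_py_alt : List String → List (List String)
  | [] => []
  | l :: ls =>
    if pvIsTable l then
      (l :: ls.takeWhile pvIsTable) :: collect_markdown_tables_py_alt (ls.dropWhile pvIsTable)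
    else
      collect_markdown_tables_py_alt ls
  termination_by ls => ls.length
  decreasing_by
    · exact Nat.lt_succ_of_le (List.length_dropWhile_le _ _)
    · exact Nat.lt_succ_self _

-- ===== PRECONDITION & SPEC =====
def Spec_collect_markdown_tables_py (lines : List String) (out : List (List String)) : Prop := out = collect_markdown_tables_py_alt lines
instance (lines : List String) (out : List (List String)) : Decidable (Spec_collect_markdown_tables_py lines out) := by unfold Spec_collect_markdown_tables_py; infer_instance

-- ===== CLAIM (what is proved, stated in full; the proofs are below) =====
def Claim_equal_collect_markdown_tables_py : Prop := ∀ (lines : List String), Dom_collect_markdown_tables_py lines → Spec_collect_markdown_tables_py lines (collect_markdown_tables_py lines)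

-- ===== LEMMAS AND PROOFS =====

-- abstract recursion equal to A's foldl-plus-flush, with explicit 'current'
def pvH : List String → List String → List (List String)
  | cur, [] => if cur = [] then [] else [cur]
  | cur, l :: ls =>
    if pvIsTable l then pvH (cur ++ [l]) ls
    else if cur = [] then pvH [] ls else cur :: pvH [] ls
  termination_by _ ls => ls.length

theorem pvH_foldl (lines : List String) : ∀ (acc : List (List String)) (cur : List String),
    (let fin := lines.foldl
        (fun (st : List (List String) × List String) line =>
          if pvIsTable line then (st.1, st.2 ++ [line])
          else if st.2 ≠ [] then (st.1 ++ [st.2], []) else st)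
        (acc, cur)
     if fin.2 ≠ [] then fin.1 ++ [fin.2] else fin.1) = acc ++ pvH cur lines := by
  induction lines with
  | nil =>
    intro acc cur
    simp only [List.foldl_nil, pvH]
    by_cases h : cur = [] <;> simp [h]
  | cons l ls ih =>
    intro acc cur
    simp only [List.foldl_cons, pvH]
    by_cases h : pvIsTable l
    · simpa [h] using ih acc (cur ++ [l])
    · by_cases hc : cur = []
      · simpa [h, hc] using ih acc []
      · simpa [h, hc] using ih (acc ++ [cur]) []

theorem pvH_alt (lines : List String) : ∀ (cur : List String),
    pvH cur lines = if cur = [] then collect_markdown_tables_py_alt lines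
      else (cur ++ lines.takeWhile pvIsTable) :: collect_markdown_tables_py_alt (lines.dropWhile pvIsTable) := by
  induction lines with
  | nil =>
    intro cur
    by_cases h : cur = [] <;> simp [pvH, collect_markdown_tables_py_alt, h]
  | cons l ls ih =>
    intro cur
    by_cases h : pvIsTable l
    · by_cases hc : cur = []
      · simp [pvH, h, hc, collect_markdown_tables_py_alt, ih [l]]
      · simp [pvH, h, hc, ih (cur ++ [l])]
    · by_cases hc : cur = []
      · simp [pvH, h, hc, collect_markdown_tables_py_alt, ih []]
      · simp [pvH, h, hc, collect_markdown_tables_py_alt, ih []]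

-- ===== VERDICT (by name: the statement is the Claim_ definition above) =====
theorem collect_markdown_tables_py_spec : Claim_equal_collect_markdown_tables_py := by
  intro lines _
  unfold Spec_collect_markdown_tables_py collect_markdown_tables_py
  have := pvH_foldl lines [] []
  simp only [List.nil_append] at this
  rw [this, pvH_alt lines []]
  simp
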